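-- pv_equiv track=rewrite | github.com/HateBin/SoftwareQualityRating | test3_V2.01.py | calculate_bug_reopen_rating
-- ===== SOURCE A (Python) =====
-- def calculate_bug_reopen_rating(X):
--     """
--     根据缺陷重新打开次数计算软件质量评分
--
--     评分规则（左闭右闭区间）:
--         0次  → 20分（质量优秀）
--         1次  → 15分（质量良好）
--         2次  → 10分（质量合格）
--         3次  → 5分（质量堪忧）
--         4次及以上 → 1分（质量差）
--
--     参数:
--         X (int): 缺陷重新打开次数，应为非负整数。
--                   当输入值非整数时会触发隐式类型转换
--
--     返回:
--         int: 对应评分值（20/15/10/5/1分），输入不符合规范时返回None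
--
--     异常处理:
--         - 输入负数值时触发AssertionError
--         - 输入非数值类型将触发TypeError
--         - 所有未定义情况返回None并打印警告
--     """
--     # 防御性处理：将输入强制转换为整数（处理浮点数输入情况）
--     try:
--         X = int(X)
--     except (ValueError, TypeError):
--         raise TypeError("错误：输入值必须为可转换为整数的类型")
--
--     # 处理负值输入（根据业务逻辑视为最差情况）
--     try:
--         assert X >= 0
--     except AssertionError:
--         raise ValueError("错误：缺陷重新打开次数不应为负数")
--
--     # 定义评分映射字典（key为最大次数阈值，value为对应得分）
--     score_mapping = {
--         0: 20,  # 0次重开得满分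
--         1: 15,  # 1次重开扣5分
--         2: 10,  # 2次重开扣10分
--         3: 5,  # 3次重开扣15分
--         4: 1  # 4次及以上扣19分
--     }
--
--     # 遍历评分阈值判断区间（按阈值降序排列）
--     for threshold in sorted(score_mapping.keys(), reverse=True):
--         if X >= threshold:
--             return score_mapping[threshold]
-- ===== SOURCE B (Python) =====
-- def calculate_bug_reopen_rating(X):
--     try:
--         X = int(X)
--     except (ValueError, TypeError):
--         raise TypeError("错误：输入值必须为可转换为整数的类型")
--     if X < 0:
--         raise ValueError("错误：缺陷重新打开次数不应为负数")
--     return max(1, 20 - 5 * X)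
-- ===== Notes on version B (the rewrite author's own statement) =====
-- stated objective: simpler
-- what changed: Replaces the score dict plus descending sorted-threshold loop with the closed form max(1, 20 - 5*X).
import Mathlib
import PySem

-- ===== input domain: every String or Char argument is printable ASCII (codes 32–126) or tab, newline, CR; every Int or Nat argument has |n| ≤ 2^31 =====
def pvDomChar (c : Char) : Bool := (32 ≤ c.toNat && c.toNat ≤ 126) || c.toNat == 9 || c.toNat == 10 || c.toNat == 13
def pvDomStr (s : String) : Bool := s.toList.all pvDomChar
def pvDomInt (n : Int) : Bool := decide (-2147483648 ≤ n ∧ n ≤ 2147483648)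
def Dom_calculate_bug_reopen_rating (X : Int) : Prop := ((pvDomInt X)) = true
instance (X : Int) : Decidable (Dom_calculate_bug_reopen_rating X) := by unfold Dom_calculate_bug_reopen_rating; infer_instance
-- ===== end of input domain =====

-- B replaces A's dict + descending-threshold loop with the closed form max(1, 20 - 5*X); equal for all X ≥ 0 (Pre_ excludes X < 0, where A raises ValueError).
-- ===== PORT A =====
def pvScoreMapping : PySem.Dict Int Int := PySem.Dict.ofList [(0, 20), (1, 15), (2, 10), (3, 5), (4, 1)]

-- loop over sorted(score_mapping.keys(), reverse=True), returning score_mapping[t] at first t with X >= t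
def pvLoopA (X : Int) : List Int → Option Int
  | [] => none
  | t :: ts => if X ≥ t then some (PySem.Dict.getD pvScoreMapping t 0) else pvLoopA X ts

def calculate_bug_reopen_rating (X : Int) : Int :=
  -- Python raises ValueError for X < 0 (excluded by Pre_); the loop's fall-through None is unreachable for X ≥ 0
  (pvLoopA X (PySem.List.sorted (PySem.Dict.keys pvScoreMapping) (fun k => k) true)).getD 0

-- ===== PORT B =====
def calculate_bug_reopen_rating_alt (X : Int) : Int :=
  max 1 (20 - 5 * X)

-- ===== PRECONDITION & SPEC =====
-- Pre_ excludes X < 0, on which Python A raises ValueError (int(X) on an int never fails).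
def Pre_calculate_bug_reopen_rating (X : Int) : Prop := 0 ≤ X
instance (X : Int) : Decidable (Pre_calculate_bug_reopen_rating X) := by unfold Pre_calculate_bug_reopen_rating; infer_instance
def pvWitness_calculate_bug_reopen_rating : Int := 2

def Spec_calculate_bug_reopen_rating (X : Int) (out : Int) : Prop := out = calculate_bug_reopen_rating_alt X
instance (X : Int) (out : Int) : Decidable (Spec_calculate_bug_reopen_rating X out) := by unfold Spec_calculate_bug_reopen_rating; infer_instance

-- ===== CLAIM (what is proved, stated in full; the proofs are below) =====
def Claim_equal_calculate_bug_reopen_rating : Prop := ∀ (X : Int), Dom_calculate_bug_reopen_rating X → Pre_calculate_bug_reopen_rating X → Spec_calculate_bug_reopen_rating X (calculate_bug_reopen_rating X)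

-- ===== LEMMAS AND PROOFS =====

-- ===== VERDICT (by name: the statement is the Claim_ definition above) =====
theorem calculate_bug_reopen_rating_spec : Claim_equal_calculate_bug_reopen_rating := by
  intro X _ hX
  unfold Spec_calculate_bug_reopen_rating calculate_bug_reopen_rating calculate_bug_reopen_rating_alt
  unfold Pre_calculate_bug_reopen_rating at hX
  norm_num [pvScoreMapping, PySem.Dict.keys, PySem.List.sorted, PySem.Dict.ofList,
    PySem.List.insertBy, PySem.Dict.update, PySem.Dict.items, PySem.Dict.empty, PySem.Dict.insert, PySem.Dict.contains, pvLoopA, PySem.Dict.getD, PySem.Dict.get?]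
  split_ifs <;> simp <;> omega
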